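-- pv_equiv track=rewrite | github.com/siri-n-shetty/codeforces-solutions | 2094d-tung-tung-sahur.py | solve
-- ===== SOURCE A (Python) =====
-- def solve(s1, s2):
--     i = j = 0
--     n1, n2 = len(s1), len(s2)
--
--     while i < n1 and j < n2:
--         if s1[i] != s2[j]:
--             return False
--
--         ch = s1[i]
--         cnt1 = cnt2 = 0
--
--         while i < n1 and s1[i] == ch:
--             cnt1 += 1
--             i += 1
--         while j < n2 and s2[j] == ch:
--             cnt2 += 1
--             j += 1
--
--         if 2 * cnt1 < cnt2 or cnt2 < cnt1:
--             return False
--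
--     return i == n1 and j == n2
-- ===== SOURCE B (Python) =====
-- def _rle(s):
--     runs = []
--     for ch in s:
--         if runs and runs[-1][0] == ch:
--             runs[-1] = (ch, runs[-1][1] + 1)
--         else:
--             runs.append((ch, 1))
--     return runs
--
--
-- def solve(s1, s2):
--     r1 = _rle(s1)
--     r2 = _rle(s2)
--     if len(r1) != len(r2):
--         return False
--     return all(c1 == c2 and n1 <= n2 <= 2 * n1 for (c1, n1), (c2, n2) in zip(r1, r2))
-- ===== Notes on version B (the rewrite author's own statement) =====
-- stated objective: alternative
-- what changed: Replaces the interleaved two-pointer scan with two independent run-length-encoding builds followed by one length check and a zipped all() comparison of the runs.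
import Mathlib
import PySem

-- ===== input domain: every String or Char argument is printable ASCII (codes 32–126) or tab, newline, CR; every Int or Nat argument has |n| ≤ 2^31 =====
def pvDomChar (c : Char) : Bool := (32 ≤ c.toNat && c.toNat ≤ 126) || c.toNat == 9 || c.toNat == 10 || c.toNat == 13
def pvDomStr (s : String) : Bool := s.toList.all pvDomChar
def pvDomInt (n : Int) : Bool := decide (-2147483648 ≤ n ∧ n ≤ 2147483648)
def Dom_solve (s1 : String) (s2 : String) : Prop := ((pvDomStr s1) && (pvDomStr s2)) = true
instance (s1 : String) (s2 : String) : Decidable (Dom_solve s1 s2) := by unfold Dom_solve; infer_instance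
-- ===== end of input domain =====

-- B replaces A's interleaved two-pointer scan by two run-length-encoding builds plus one
-- comparison pass (objective: alternative decomposition, same cost).

-- ===== PORT A =====
-- A's inner `while` loops: count consecutive characters equal to ch, return (count, rest).
def solveCount (ch : Char) : List Char → Nat × List Char
  | [] => (0, [])
  | d :: t =>
      if d = ch then
        let (n, r) := solveCount ch t
        (n + 1, r)
      else (0, d :: t)

theorem solveCount_snd_length_le (ch : Char) (l : List Char) :
    (solveCount ch l).2.length ≤ l.length := by
  induction l with
  | nil => simp [solveCount]
  | cons d t ih =>
      simp only [solveCount]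
      split
      · simpa using Nat.le_succ_of_le ih
      · simp

-- A's outer `while i < n1 and j < n2` loop over the remaining suffixes.
def solveLoop : List Char → List Char → Bool
  | c1 :: t1, c2 :: t2 =>
      if c1 ≠ c2 then false
      else if 2 * (solveCount c1 (c1 :: t1)).1 < (solveCount c1 (c2 :: t2)).1 ∨
          (solveCount c1 (c2 :: t2)).1 < (solveCount c1 (c1 :: t1)).1 then false
      else solveLoop (solveCount c1 (c1 :: t1)).2 (solveCount c1 (c2 :: t2)).2
  | l1, l2 => l1.isEmpty && l2.isEmpty
termination_by l1 _ => l1.length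
decreasing_by
  simp only [solveCount]
  exact Nat.lt_succ_of_le (solveCount_snd_length_le c1 t1)

def solve (s1 : String) (s2 : String) : Bool :=
  solveLoop s1.toList s2.toList

-- ===== PORT B =====
-- Source B's _rle: a fold over the characters, incrementing the last run or appending a new one.
def rleStep (runs : List (Char × Nat)) (ch : Char) : List (Char × Nat) :=
  match runs.getLast? with
  | some (c, n) => if c = ch then runs.dropLast ++ [(c, n + 1)] else runs ++ [(ch, 1)]
  | none => [(ch, 1)]

def rleFold (s : List Char) : List (Char × Nat) :=
  s.foldl rleStep []

def solve_alt (s1 : String) (s2 : String) : Bool :=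
  let r1 := rleFold s1.toList
  let r2 := rleFold s2.toList
  if r1.length ≠ r2.length then false
  else (r1.zip r2).all fun p => p.1.1 == p.2.1 && p.1.2 ≤ p.2.2 && p.2.2 ≤ 2 * p.1.2

-- ===== PRECONDITION & SPEC =====
def Spec_solve (s1 : String) (s2 : String) (out : Bool) : Prop := out = solve_alt s1 s2
instance (s1 : String) (s2 : String) (out : Bool) : Decidable (Spec_solve s1 s2 out) := by unfold Spec_solve; infer_instance

-- ===== CLAIM (what is proved, stated in full; the proofs are below) =====
def Claim_equal_solve : Prop := ∀ (s1 : String) (s2 : String), Dom_solve s1 s2 → Spec_solve s1 s2 (solve s1 s2)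

-- ===== LEMMAS AND PROOFS =====

-- branch equations for the helpers
theorem solveCount_cons_pos (ch d : Char) (t : List Char) (h : d = ch) :
    solveCount ch (d :: t) = ((solveCount ch t).1 + 1, (solveCount ch t).2) := by
  simp [solveCount, h]

theorem solveCount_cons_neg (ch d : Char) (t : List Char) (h : ¬ d = ch) :
    solveCount ch (d :: t) = (0, d :: t) := by
  simp [solveCount, h]

-- canonical recursive RLE, proof intermediary between the two ports
def rleAux (c : Char) (n : Nat) : List Char → List (Char × Nat)
  | [] => [(c, n)]
  | d :: t => if d = c then rleAux c (n + 1) t else (c, n) :: rleAux d 1 t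

def rleRec : List Char → List (Char × Nat)
  | [] => []
  | c :: t => rleAux c 1 t

theorem rleAux_cons_pos (c d : Char) (n : Nat) (t : List Char) (h : d = c) :
    rleAux c n (d :: t) = rleAux c (n + 1) t := by
  simp [rleAux, h]

theorem rleAux_cons_neg (c d : Char) (n : Nat) (t : List Char) (h : ¬ d = c) :
    rleAux c n (d :: t) = (c, n) :: rleAux d 1 t := by
  simp [rleAux, h]

theorem rleStep_concat (acc : List (Char × Nat)) (c : Char) (n : Nat) (d : Char) :
    rleStep (acc ++ [(c, n)]) d =
      if d = c then acc ++ [(c, n + 1)] else (acc ++ [(c, n)]) ++ [(d, 1)] := by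
  simp only [rleStep, List.getLast?_append, List.getLast?_singleton, Option.some_or]
  by_cases h : d = c
  · simp [h]
  · have h' : ¬ c = d := fun hh => h hh.symm
    simp [h, h']

theorem foldl_rleStep (l : List Char) :
    ∀ (acc : List (Char × Nat)) (c : Char) (n : Nat),
      List.foldl rleStep (acc ++ [(c, n)]) l = acc ++ rleAux c n l := by
  induction l with
  | nil => intro acc c n; simp [rleAux]
  | cons d t ih =>
      intro acc c n
      rw [List.foldl_cons, rleStep_concat]
      by_cases h : d = c
      · rw [if_pos h, rleAux_cons_pos c d n t h]
        exact ih acc c (n + 1)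
      · rw [if_neg h, rleAux_cons_neg c d n t h, ih (acc ++ [(c, n)]) d 1]
        simp

theorem rleFold_eq_rleRec (s : List Char) : rleFold s = rleRec s := by
  cases s with
  | nil => rfl
  | cons c t =>
      show List.foldl rleStep (rleStep [] c) t = rleRec (c :: t)
      have : rleStep [] c = [] ++ [(c, 1)] := by simp [rleStep]
      rw [this, foldl_rleStep t [] c 1]
      rfl

-- structural comparison of two RLE lists
def checkRec : List (Char × Nat) → List (Char × Nat) → Bool
  | [], [] => true
  | (c1, n1) :: t1, (c2, n2) :: t2 =>
      c1 == c2 && n1 ≤ n2 && n2 ≤ 2 * n1 && checkRec t1 t2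
  | _, _ => false

theorem checkRec_eq_zipAll (a : List (Char × Nat)) :
    ∀ b : List (Char × Nat),
      checkRec a b =
        if a.length ≠ b.length then false
        else (a.zip b).all fun p => p.1.1 == p.2.1 && p.1.2 ≤ p.2.2 && p.2.2 ≤ 2 * p.1.2 := by
  induction a with
  | nil =>
      intro b
      cases b <;> simp [checkRec]
  | cons x t1 ih =>
      intro b
      cases b with
      | nil => simp [checkRec]
      | cons y t2 =>
          obtain ⟨c1, n1⟩ := x
          obtain ⟨c2, n2⟩ := y
          simp only [checkRec, ih t2, List.length_cons, List.zip_cons_cons, List.all_cons]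
          by_cases h : t1.length = t2.length
          · simp [h, Bool.and_assoc]
          · simp [h]

theorem rleAux_eq_count (l : List Char) :
    ∀ (c : Char) (n : Nat),
      rleAux c n l = (c, n + (solveCount c l).1) :: rleRec (solveCount c l).2 := by
  induction l with
  | nil => intro c n; simp [rleAux, solveCount, rleRec]
  | cons d t ih =>
      intro c n
      by_cases h : d = c
      · rw [rleAux_cons_pos c d n t h, ih c (n + 1), solveCount_cons_pos c d t h]
        have hh : n + 1 + (solveCount c t).1 = n + ((solveCount c t).1 + 1) := by omega
        rw [hh]
      · rw [rleAux_cons_neg c d n t h, solveCount_cons_neg c d t h]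
        simp [rleRec]

theorem rleRec_cons (c : Char) (t : List Char) :
    rleRec (c :: t) = (c, 1 + (solveCount c t).1) :: rleRec (solveCount c t).2 := by
  rw [rleRec, rleAux_eq_count t c 1]

-- main lemma: A's loop computes exactly the structural comparison of the two RLEs
theorem solveLoop_eq_aux (n : Nat) :
    ∀ l1 l2 : List Char, l1.length ≤ n →
      solveLoop l1 l2 = checkRec (rleRec l1) (rleRec l2) := by
  induction n with
  | zero =>
      intro l1 l2 hlen
      have h1 : l1 = [] := List.eq_nil_of_length_eq_zero (Nat.le_zero.1 hlen)
      subst h1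
      cases l2 with
      | nil => simp [solveLoop, rleRec, checkRec]
      | cons c2 t2 =>
          rw [show rleRec ([] : List Char) = [] from rfl, rleRec_cons c2 t2]
          simp [solveLoop, checkRec]
  | succ n ih =>
      intro l1 l2 hlen
      cases l1 with
      | nil =>
          cases l2 with
          | nil => simp [solveLoop, rleRec, checkRec]
          | cons c2 t2 =>
              rw [show rleRec ([] : List Char) = [] from rfl, rleRec_cons c2 t2]
              simp [solveLoop, checkRec]
      | cons c1 t1 =>
          cases l2 with
          | nil =>
              rw [rleRec_cons c1 t1, show rleRec ([] : List Char) = [] from rfl]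
              simp [solveLoop, checkRec]
          | cons c2 t2 =>
              rw [solveLoop]
              by_cases hc : c1 = c2
              · subst hc
                rw [if_neg (fun hh => hh rfl)]
                rw [solveCount_cons_pos c1 c1 t1 rfl, solveCount_cons_pos c1 c1 t2 rfl]
                rw [rleRec_cons c1 t1, rleRec_cons c1 t2]
                simp only [checkRec]
                by_cases hbad : 2 * ((solveCount c1 t1).1 + 1) < (solveCount c1 t2).1 + 1 ∨
                    (solveCount c1 t2).1 + 1 < (solveCount c1 t1).1 + 1
                · rw [if_pos hbad]
                  rcases hbad with hb | hb
                  · have hle : ¬ (1 + (solveCount c1 t2).1 ≤ 2 * (1 + (solveCount c1 t1).1)) := by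
                      omega
                    simp [hle]
                  · have hle : ¬ (1 + (solveCount c1 t1).1 ≤ 1 + (solveCount c1 t2).1) := by
                      omega
                    simp [hle]
                · rw [if_neg hbad]
                  have h1 : 1 + (solveCount c1 t1).1 ≤ 1 + (solveCount c1 t2).1 := by omega
                  have h2 : 1 + (solveCount c1 t2).1 ≤ 2 * (1 + (solveCount c1 t1).1) := by omega
                  have hrec := ih (solveCount c1 t1).2 (solveCount c1 t2).2
                    (by
                      have := solveCount_snd_length_le c1 t1
                      simp only [List.length_cons] at hlen
                      omega)
                  simp [h1, h2, hrec]
              · rw [if_pos hc]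
                rw [rleRec_cons c1 t1, rleRec_cons c2 t2]
                simp [checkRec, hc]

theorem solve_eq_alt (s1 s2 : String) : solve s1 s2 = solve_alt s1 s2 := by
  unfold solve solve_alt
  rw [solveLoop_eq_aux s1.toList.length s1.toList s2.toList (Nat.le_refl _),
    ← rleFold_eq_rleRec, ← rleFold_eq_rleRec, ← checkRec_eq_zipAll]

-- ===== VERDICT (by name: the statement is the Claim_ definition above) =====
theorem solve_spec : Claim_equal_solve := by
  intro s1 s2 _
  show solve s1 s2 = solve_alt s1 s2
  exact solve_eq_alt s1 s2
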